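-- pv_equiv track=rewrite | github.com/Andr995/SchedulerClassCS | scheduler.py | _valid_starts
-- ===== SOURCE A (Python) =====
-- def _valid_starts(duration, ds, de, ls, le):
--     """Restituisce le ore di inizio valide per un evento di durata data,
--     escludendo lezioni che sovrappongono la pausa pranzo."""
--     starts = []
--     for h in range(ds, de):
--         end = h + duration
--         if end > de:
--             break
--         # Controlla sovrapposizione con pranzo [ls, le)
--         if h < le and end > ls:
--             continue
--         starts.append(h)
--     return starts
-- ===== SOURCE B (Python) =====
-- def _valid_starts(duration, ds, de, ls, le):
--     # Interval arithmetic: valid starts are [ds, U) minus the lunch-forbidden band [fs, fe).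
--     U = min(de, de - duration + 1)
--     fs = max(ds, ls - duration + 1)
--     fe = min(U, le)
--     if fe <= fs:
--         return list(range(ds, U))
--     return list(range(ds, fs)) + list(range(fe, U))
-- ===== Notes on version B (the rewrite author's own statement) =====
-- stated objective: simpler
-- what changed: Replaced the per-hour scan with break/continue by closed-form interval arithmetic: valid starts are the range [ds, min(de, de-duration+1)) minus the forbidden lunch band [fs, fe), returned as one or two range() lists.
import Mathlib
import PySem

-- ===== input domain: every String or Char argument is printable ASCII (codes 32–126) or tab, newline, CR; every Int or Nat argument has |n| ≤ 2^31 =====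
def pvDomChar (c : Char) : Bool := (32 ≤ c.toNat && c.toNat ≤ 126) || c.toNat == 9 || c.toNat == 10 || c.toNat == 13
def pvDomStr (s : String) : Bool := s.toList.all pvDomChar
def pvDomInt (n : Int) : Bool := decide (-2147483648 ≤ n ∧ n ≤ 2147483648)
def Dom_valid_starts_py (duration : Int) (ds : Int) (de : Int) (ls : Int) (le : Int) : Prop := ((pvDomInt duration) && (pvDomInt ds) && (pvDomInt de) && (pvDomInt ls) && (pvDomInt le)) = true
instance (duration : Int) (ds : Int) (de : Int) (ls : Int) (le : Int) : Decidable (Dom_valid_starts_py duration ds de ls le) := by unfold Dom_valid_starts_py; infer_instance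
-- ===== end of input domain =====

-- B replaces A's per-hour scan (with break/continue) by closed-form interval arithmetic
-- returning one or two ranges; objective: simpler (plain interval bounds instead of a filtered loop).

-- ===== PORT A =====
-- the for-loop over range(ds, de) with break/continue, as structural recursion on the range list
def vsLoopA (duration : Int) (de : Int) (ls : Int) (le : Int) : List Int → List Int
  | [] => []
  | h :: t =>
    if de < h + duration then []                                  -- 'if end > de: break'
    else if h < le ∧ ls < h + duration then vsLoopA duration de ls le t   -- 'continue'
    else h :: vsLoopA duration de ls le t                          -- 'starts.append(h)'

def valid_starts_py (duration : Int) (ds : Int) (de : Int) (ls : Int) (le : Int) : List Int :=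
  vsLoopA duration de ls le (PySem.List.pyRange ds de 1)

-- ===== PORT B =====
def valid_starts_py_alt (duration : Int) (ds : Int) (de : Int) (ls : Int) (le : Int) : List Int :=
  let U := min de (de - duration + 1)
  let fs := max ds (ls - duration + 1)
  let fe := min U le
  if fe ≤ fs then PySem.List.pyRange ds U 1
  else PySem.List.pyRange ds fs 1 ++ PySem.List.pyRange fe U 1

-- ===== PRECONDITION & SPEC =====
def Spec_valid_starts_py (duration : Int) (ds : Int) (de : Int) (ls : Int) (le : Int) (out : List Int) : Prop := out = valid_starts_py_alt duration ds de ls le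
instance (duration : Int) (ds : Int) (de : Int) (ls : Int) (le : Int) (out : List Int) : Decidable (Spec_valid_starts_py duration ds de ls le out) := by unfold Spec_valid_starts_py; infer_instance

-- ===== CLAIM (what is proved, stated in full; the proofs are below) =====
def Claim_equal_valid_starts_py : Prop := ∀ (duration : Int) (ds : Int) (de : Int) (ls : Int) (le : Int), Dom_valid_starts_py duration ds de ls le → Spec_valid_starts_py duration ds de ls le (valid_starts_py duration ds de ls le)

-- ===== LEMMAS AND PROOFS =====

theorem memA (duration de ls le : Int) :
    ∀ n ds, (de - ds).toNat = n → ∀ x,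
      (x ∈ vsLoopA duration de ls le (PySem.List.pyRange ds de 1) ↔
        ds ≤ x ∧ x < de ∧ x + duration ≤ de ∧ ¬(x < le ∧ ls < x + duration)) := by
  intro n
  induction n with
  | zero =>
    intro ds h x
    rw [PySem.List.pyRange_one_eq_nil (by omega)]
    simp [vsLoopA]
    omega
  | succ n ih =>
    intro ds h x
    have hlt : ds < de := by omega
    rw [PySem.List.pyRange_one_cons hlt]
    simp only [vsLoopA]
    have ih' := ih (ds + 1) (by omega) x
    split_ifs with h1 h2
    · exact iff_of_false (by simp) (by omega)
    · rw [ih']; omega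
    · simp only [List.mem_cons, ih']; omega

theorem pairwiseA (duration de ls le : Int) :
    ∀ n ds, (de - ds).toNat = n →
      (vsLoopA duration de ls le (PySem.List.pyRange ds de 1)).Pairwise (· < ·) := by
  intro n
  induction n with
  | zero =>
    intro ds h
    rw [PySem.List.pyRange_one_eq_nil (by omega)]
    simp [vsLoopA]
  | succ n ih =>
    intro ds h
    have hlt : ds < de := by omega
    rw [PySem.List.pyRange_one_cons hlt]
    simp only [vsLoopA]
    have ih' := ih (ds + 1) (by omega)
    split_ifs with h1 h2
    · simp
    · exact ih'
    · refine List.pairwise_cons.mpr ⟨?_, ih'⟩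
      intro y hy
      have := (memA duration de ls le n (ds + 1) (by omega) y).mp hy
      omega

theorem memB (duration ds de ls le : Int) (x : Int) :
    x ∈ valid_starts_py_alt duration ds de ls le ↔
      ds ≤ x ∧ x < de ∧ x + duration ≤ de ∧ ¬(x < le ∧ ls < x + duration) := by
  simp only [valid_starts_py_alt]
  split_ifs with h
  · rw [PySem.List.mem_pyRange_one]; omega
  · simp only [List.mem_append, PySem.List.mem_pyRange_one]; omega

theorem pairwiseB (duration ds de ls le : Int) :
    (valid_starts_py_alt duration ds de ls le).Pairwise (· < ·) := by
  simp only [valid_starts_py_alt]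
  split_ifs with h
  · exact PySem.List.pairwise_lt_pyRange_one _ _
  · refine List.pairwise_append.mpr ⟨PySem.List.pairwise_lt_pyRange_one _ _,
      PySem.List.pairwise_lt_pyRange_one _ _, ?_⟩
    intro x hx y hy
    rw [PySem.List.mem_pyRange_one] at hx hy
    omega

-- ===== VERDICT (by name: the statement is the Claim_ definition above) =====
theorem valid_starts_py_spec : Claim_equal_valid_starts_py := by
  intro duration ds de ls le _
  unfold Spec_valid_starts_py valid_starts_py
  have pa := pairwiseA duration de ls le (de - ds).toNat ds rfl
  have pb := pairwiseB duration ds de ls le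
  have hmem : ∀ x, x ∈ vsLoopA duration de ls le (PySem.List.pyRange ds de 1) ↔
      x ∈ valid_starts_py_alt duration ds de ls le := by
    intro x
    rw [memA duration de ls le (de - ds).toNat ds rfl x, memB]
  have na : (vsLoopA duration de ls le (PySem.List.pyRange ds de 1)).Nodup :=
    pa.imp (fun h => ne_of_lt h)
  have nb : (valid_starts_py_alt duration ds de ls le).Nodup :=
    pb.imp (fun h => ne_of_lt h)
  have hperm := (List.perm_ext_iff_of_nodup na nb).mpr hmem
  exact List.Perm.eq_of_pairwise (fun _ _ _ _ hab hba => absurd hba (lt_asymm hab)) pa pb hperm
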